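-- pv_equiv track=rewrite | github.com/rixwoodling/data-parsers | crossmark_parser.py | sort_results_by_unique_values
-- ===== SOURCE A (Python) =====
-- def sort_results_by_unique_values(results, unique_values):
--     # Sort results within each group of unique values.
--     sorted_results = []
--
--     # Loop through each unique value
--     for value in unique_values:
--         # Filter results that contain the current unique value as a component
--         value_results = [result for result in results if f"/{value}/" in result]
--
--         if value_results:
--             # Split each path into components
--             split_results = [result.split('/') for result in value_results]
--
--             # Determine the length of the shortest path
--             max_depth = min(len(path) for path in split_results)
--
--             # If only one result exists for this unique value, add it directly
--             if len(value_results) == 1: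
--                 sorted_results.extend(value_results)
--                 continue
--
--             # Compare components starting from the end, moving backwards
--             for i in range(1, max_depth + 1):
--                 # Get the i-th component from the end for all paths
--                 components = [path[-i] for path in split_results]
--
--                 # Check if the components differ
--                 if len(set(components)) > 1:
--                     # Sort by this non-unique component and add to the sorted list
--                     sorted_value_results = sorted(value_results, key=lambda x: x.split('/')[-i])
--                     sorted_results.extend(sorted_value_results)
--                     break
--             else:
--                 # If all components are identical, just add the unsorted results
--                 sorted_results.extend(value_results)
--
--     return sorted_results
-- ===== SOURCE B (Python) =====
-- def sort_results_by_unique_values(results, unique_values):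
--     # Reverse each path's components once; the longest common prefix of the reversed
--     # paths (folded pairwise over the group) pins the sort-key position directly.
--     def lcp(x, y):
--         # longest common prefix of two lists
--         if x and y and x[0] == y[0]:
--             return [x[0]] + lcp(x[1:], y[1:])
--         return []
--
--     vals = list(dict.fromkeys(unique_values))
--     groups = {v: [] for v in vals}
--     for r in results:
--         rparts = r.split('/')[::-1]
--         for v in vals:
--             if f"/{v}/" in r:
--                 groups[v].append((r, rparts))
--
--     out = []
--     for v in unique_values:
--         grp = groups[v]
--         if not grp:
--             continue
--         if len(grp) == 1:
--             out.append(grp[0][0])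
--             continue
--         pre = grp[0][1]
--         for _, p in grp[1:]:
--             pre = lcp(pre, p)
--         k = len(pre)
--         if k < min(len(p) for _, p in grp):
--             out.extend(r for r, _ in sorted(grp, key=lambda t: t[1][k]))
--         else:
--             out.extend(r for r, _ in grp)
--     return out
-- ===== Notes on version B (the rewrite author's own statement) =====
-- stated objective: alternative
-- what changed: B reverses each path's component list once and orders a group by folding a pairwise longest-common-prefix over the reversed lists: the fold's length directly pins the sort-key position, replacing A's per-index scan that rebuilds the component column and tests its set cardinality at every depth (grouping is also done in one result-major pass instead of per-value re-filtering).
import Mathlib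
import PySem

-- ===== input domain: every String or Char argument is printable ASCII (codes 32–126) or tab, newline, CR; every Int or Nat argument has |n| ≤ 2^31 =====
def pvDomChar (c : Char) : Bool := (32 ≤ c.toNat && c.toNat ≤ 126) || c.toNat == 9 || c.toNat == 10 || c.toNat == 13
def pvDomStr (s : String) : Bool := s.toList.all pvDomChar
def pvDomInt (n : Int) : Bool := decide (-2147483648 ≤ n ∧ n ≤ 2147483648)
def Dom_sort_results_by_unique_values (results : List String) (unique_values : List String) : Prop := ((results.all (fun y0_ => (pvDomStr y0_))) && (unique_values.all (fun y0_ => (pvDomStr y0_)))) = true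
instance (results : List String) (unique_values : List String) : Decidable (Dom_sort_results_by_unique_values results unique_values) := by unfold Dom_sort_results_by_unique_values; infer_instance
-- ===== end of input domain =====

-- B reverses each path's components once and finds the sort-key position as the length of a
-- pairwise-folded longest common prefix of the reversed paths, instead of A's per-depth column
-- scan with a set-cardinality test; grouping is one result-major pass (objective: alternative).


-- ===== PORT A =====
-- s.split('/'): sep ≠ "" so split? is always `some`; the [] default is never used
def pySplitSlash (s : String) : List String := (PySem.Str.split? s "/").getD []

-- A's inner `for i in range(1, max_depth+1): … break` / `else:` loop, over the remaining range;
-- path[-i] is always in range (i ≤ max_depth = min length), so the "" default is never used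
def aScan (value_results : List String) (split_results : List (List String)) : List Int → List String
  | [] => value_results
  | i :: rest =>
    let components := split_results.map (fun p => PySem.List.pyGetD p (-i) "")
    if 1 < (PySem.Set.ofList components).length then
      PySem.List.sorted value_results (fun x => PySem.List.pyGetD (pySplitSlash x) (-i) "") false
    else aScan value_results split_results rest

def sort_results_by_unique_values (results : List String) (unique_values : List String) : List String :=
  unique_values.foldl (fun sorted_results value =>
    let value_results := results.filter (fun r => PySem.Str.isIn ("/" ++ value ++ "/") r)
    if value_results.isEmpty then sorted_results
    else
      let split_results := value_results.map pySplitSlash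
      -- min(...) over a nonempty list: the `.getD 0` default is never used
      let max_depth := (PySem.List.min? (split_results.map PySem.List.len) (fun x => x)).getD 0
      if value_results.length == 1 then sorted_results ++ value_results
      else sorted_results ++ aScan value_results split_results (PySem.List.pyRange 1 (max_depth + 1))
  ) []

-- ===== PORT B =====
-- B's recursive lcp : longest common prefix of two lists
def lcpL : List String → List String → List String
  | x :: xs, y :: ys => if x == y then x :: lcpL xs ys else []
  | _, _ => []

def sort_results_by_unique_values_alt (results : List String) (unique_values : List String) : List String :=
  let vals := PySem.List.dedup unique_values
  let groups0 := vals.foldl (fun g v => g.insert v ([] : List (String × List String))) PySem.Dict.empty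
  let groups := results.foldl (fun g r =>
      let rparts := (PySem.List.slice? (pySplitSlash r) none none (-1)).getD []   -- r.split('/')[::-1]; step ≠ 0, so getD's default is never used
      vals.foldl (fun g' v =>
        if PySem.Str.isIn ("/" ++ v ++ "/") r then g'.modify v [] (fun l => l ++ [(r, rparts)]) else g') g)
    groups0
  unique_values.foldl (fun out v =>
    -- groups[v]: v is always a key of groups (vals = dedup unique_values), so getD's default is never used
    let grp := groups.getD v []
    if grp.isEmpty then out
    else if grp.length == 1 then out ++ [(PySem.List.pyGetD grp 0 ("", [])).1]
    else
      let pre := (PySem.List.slice grp (some 1) none).foldl (fun s t => lcpL s t.2) (PySem.List.pyGetD grp 0 ("", [])).2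
      let k := PySem.List.len pre
      if k < (PySem.List.min? (grp.map (fun t => PySem.List.len t.2)) (fun x => x)).getD 0 then
        out ++ (PySem.List.sorted grp (fun t => PySem.List.pyGetD t.2 k "") false).map (fun t => t.1)
      else out ++ grp.map (fun t => t.1)
  ) []

-- ===== PRECONDITION & SPEC =====
def Spec_sort_results_by_unique_values (results : List String) (unique_values : List String) (out : List String) : Prop := out = sort_results_by_unique_values_alt results unique_values
instance (results : List String) (unique_values : List String) (out : List String) : Decidable (Spec_sort_results_by_unique_values results unique_values out) := by unfold Spec_sort_results_by_unique_values; infer_instance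

-- ===== CLAIM (what is proved, stated in full; the proofs are below) =====
def Claim_equal_sort_results_by_unique_values : Prop := ∀ (results : List String) (unique_values : List String), Dom_sort_results_by_unique_values results unique_values → Spec_sort_results_by_unique_values results unique_values (sort_results_by_unique_values results unique_values)

-- ===== LEMMAS AND PROOFS =====

-- ---- the dict of groups holds exactly the filtered (and decorated) results ----

theorem getD_init_groups {α : Type} (l : List String) (g : PySem.Dict String (List α))
    (h : ∀ u, g.getD u [] = []) (u : String) :
    (l.foldl (fun g v => g.insert v ([] : List α)) g).getD u [] = [] := by
  induction l generalizing g with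
  | nil => exact h u
  | cons v l ih =>
    simp only [List.foldl_cons]
    exact ih _ (fun u => by rw [PySem.Dict.getD_insert]; split <;> simp [h])

theorem getD_inner_step {α : Type} (vs : List String) (t : String → Bool)
    (f : List α → List α) (g : PySem.Dict String (List α))
    (v : String) (hnd : vs.Nodup) :
    (vs.foldl (fun g' u => if t u then g'.modify u [] f else g') g).getD v []
      = if v ∈ vs ∧ t v = true then f (g.getD v []) else g.getD v [] := by
  induction vs generalizing g with
  | nil => simp
  | cons u vs ih =>
    have hnd' := hnd.of_cons
    simp only [List.foldl_cons]
    rw [ih _ hnd']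
    by_cases hv : v = u
    · subst hv
      have hnm : v ∉ vs := (List.nodup_cons.mp hnd).1
      by_cases ht : t v = true
      · rw [if_pos ht, if_neg (by simp [hnm]), if_pos ⟨List.mem_cons_self, ht⟩,
            PySem.Dict.getD_modify, if_pos rfl]
      · rw [if_neg ht, if_neg (by simp [hnm]), if_neg (by simp [ht])]
    · have hiff : (v ∈ u :: vs ∧ t v = true) ↔ (v ∈ vs ∧ t v = true) := by
        simp [List.mem_cons, hv]
      by_cases hV : v ∈ vs ∧ t v = true
      · by_cases ht : t u = true
        · rw [if_pos ht, if_pos hV, if_pos (hiff.mpr hV), PySem.Dict.getD_modify, if_neg hv]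
        · rw [if_neg ht, if_pos hV, if_pos (hiff.mpr hV)]
      · by_cases ht : t u = true
        · rw [if_pos ht, if_neg hV, if_neg (fun h => hV (hiff.mp h)), PySem.Dict.getD_modify, if_neg hv]
        · rw [if_neg ht, if_neg hV, if_neg (fun h => hV (hiff.mp h))]

theorem getD_groups {α : Type} (rs vs : List String) (t : String → String → Bool)
    (h : String → α) (g : PySem.Dict String (List α))
    (v : String) (hnd : vs.Nodup) (hv : v ∈ vs) :
    (rs.foldl (fun g r =>
        vs.foldl (fun g' u => if t u r then g'.modify u [] (fun l => l ++ [h r]) else g') g) g).getD v []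
      = g.getD v [] ++ (rs.filter (fun r => t v r)).map h := by
  induction rs generalizing g with
  | nil => simp
  | cons r rs ih =>
    simp only [List.foldl_cons]
    rw [ih, getD_inner_step vs (fun u => t u r) _ g v hnd]
    by_cases ht : t v r = true
    · rw [if_pos ⟨hv, ht⟩, List.filter_cons_of_pos ht, List.map_cons, List.append_assoc,
          List.singleton_append]
    · rw [if_neg (by simp [ht]), List.filter_cons_of_neg (by simp [ht])]

-- ---- set cardinality vs "all equal to the head" (A's differ test) ----

theorem set_card_gt_one (x : String) (l : List String) :
    (1 < (PySem.Set.ofList (x :: l)).length) ↔ ¬ ((x :: l).all (fun y => y == x) = true) := by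
  constructor
  · intro hlen hall
    have hall' : ∀ y ∈ x :: l, y = x := by
      intro y hy
      simpa using (List.all_eq_true.mp hall) y hy
    match hS : PySem.Set.ofList (x :: l) with
    | [] => rw [hS] at hlen; simp at hlen
    | [a] => rw [hS] at hlen; simp at hlen
    | a :: b :: t =>
      have hnd := PySem.Set.nodup_ofList (x :: l)
      rw [hS] at hnd
      have ha : a ∈ x :: l := (PySem.Set.mem_ofList _ a).mp (by rw [hS]; simp)
      have hb : b ∈ x :: l := (PySem.Set.mem_ofList _ b).mp (by rw [hS]; simp)
      have : a = b := by rw [hall' a ha, hall' b hb]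
      exact (List.nodup_cons.mp hnd).1 (this ▸ List.mem_cons_self)
  · intro hall
    obtain ⟨y, hy, hyx⟩ : ∃ y ∈ x :: l, ¬ (y == x) = true := by
      by_contra h
      push Not at h
      exact hall (List.all_eq_true.mpr h)
    have hyx' : y ≠ x := by simpa using hyx
    have hxm : x ∈ PySem.Set.ofList (x :: l) := (PySem.Set.mem_ofList _ x).mpr List.mem_cons_self
    have hym : y ∈ PySem.Set.ofList (x :: l) := (PySem.Set.mem_ofList _ y).mpr hy
    match hS : PySem.Set.ofList (x :: l) with
    | [] => rw [hS] at hxm; simp at hxm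
    | [a] =>
      rw [hS] at hxm hym
      simp at hxm hym
      exact absurd (hym.trans hxm.symm) hyx'
    | a :: b :: t => simp

-- ---- longest common prefix: basic laws and the pairwise fold ----

theorem lcpL_prefix_left (x : List String) : ∀ y, lcpL x y <+: x := by
  induction x with
  | nil => intro y; cases y <;> simp [lcpL]
  | cons a x ih =>
    intro y
    cases y with
    | nil => simp [lcpL]
    | cons b y =>
      rw [lcpL]
      split
      · next hab => exact List.cons_prefix_cons.mpr ⟨rfl, ih y⟩
      · simp

theorem lcpL_prefix_right (x : List String) : ∀ y, lcpL x y <+: y := by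
  induction x with
  | nil => intro y; cases y <;> simp [lcpL]
  | cons a x ih =>
    intro y
    cases y with
    | nil => simp [lcpL]
    | cons b y =>
      rw [lcpL]
      split
      · next hab => exact List.cons_prefix_cons.mpr ⟨(by simpa using hab : a = b).symm ▸ rfl, ih y⟩
      · simp

theorem lcpL_max (z : List String) : ∀ x y, z <+: x → z <+: y → z <+: lcpL x y := by
  induction z with
  | nil => intro x y _ _; simp
  | cons c z ih =>
    intro x y hx hy
    obtain ⟨x', rfl, hx'⟩ : ∃ x', x = c :: x' ∧ z <+: x' := by
      cases x with
      | nil => simp at hx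
      | cons a x' =>
        obtain ⟨h1, h2⟩ := List.cons_prefix_cons.mp hx
        exact ⟨x', by rw [h1], h2⟩
    obtain ⟨y', rfl, hy'⟩ : ∃ y', y = c :: y' ∧ z <+: y' := by
      cases y with
      | nil => simp at hy
      | cons b y' =>
        obtain ⟨h1, h2⟩ := List.cons_prefix_cons.mp hy
        exact ⟨y', by rw [h1], h2⟩
    rw [lcpL, if_pos (by simp)]
    exact List.cons_prefix_cons.mpr ⟨rfl, ih x' y' hx' hy'⟩

theorem fold_lcp_prefix_acc (rs : List (List String)) :
    ∀ a, rs.foldl (fun a p => lcpL a p.reverse) a <+: a := by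
  induction rs with
  | nil => intro a; simp
  | cons p rs ih =>
    intro a
    simp only [List.foldl_cons]
    exact (ih (lcpL a p.reverse)).trans (lcpL_prefix_left a p.reverse)

theorem fold_lcp_prefix_mem (rs : List (List String)) :
    ∀ a p, p ∈ rs → rs.foldl (fun a p => lcpL a p.reverse) a <+: p.reverse := by
  induction rs with
  | nil => intro a p hp; simp at hp
  | cons q rs ih =>
    intro a p hp
    simp only [List.foldl_cons]
    rcases List.mem_cons.mp hp with h | h
    · subst h
      exact (fold_lcp_prefix_acc rs (lcpL a p.reverse)).trans (lcpL_prefix_right a p.reverse)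
    · exact ih _ p h

theorem fold_lcp_max (rs : List (List String)) :
    ∀ a z, z <+: a → (∀ p ∈ rs, z <+: p.reverse) →
      z <+: rs.foldl (fun a p => lcpL a p.reverse) a := by
  induction rs with
  | nil => intro a z hz _; simpa using hz
  | cons q rs ih =>
    intro a z hz hmem
    simp only [List.foldl_cons]
    exact ih _ z (lcpL_max z a q.reverse hz (hmem q List.mem_cons_self)) (fun p hp => hmem p (List.mem_cons_of_mem _ hp))

-- ---- indexing: xs[-(j+1)] is xs[::-1][j], also out of range (both give the default) ----

theorem pyGetD_oor_high (xs : List String) (i : Int) (d : String) (h : (xs.length : Int) ≤ i) :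
    PySem.List.pyGetD xs i d = d := by
  have hn : PySem.List.pyGet? xs i = none := by
    rw [PySem.List.pyGet?_eq_none_iff]; unfold PySem.Raise.InRange; omega
  show (PySem.List.pyGet? xs i).getD d = d
  rw [hn]; rfl

theorem pyGetD_oor_low (xs : List String) (i : Int) (d : String) (h : i < -(xs.length : Int)) :
    PySem.List.pyGetD xs i d = d := by
  have hn : PySem.List.pyGet? xs i = none := by
    rw [PySem.List.pyGet?_eq_none_iff]; unfold PySem.Raise.InRange; omega
  show (PySem.List.pyGet? xs i).getD d = d
  rw [hn]; rfl

theorem key_ext (xs : List String) (j : Nat) (d : String) :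
    PySem.List.pyGetD xs.reverse ((j : Int)) d = PySem.List.pyGetD xs (-((j : Int) + 1)) d := by
  by_cases h : j < xs.length
  · rw [PySem.List.pyGetD_eq_getElem (xs := xs.reverse) (i := (j : Int)) (d := d) (by omega)
        (by simp; exact_mod_cast h)]
    rw [show (-((j : Int) + 1)) = (-(((j + 1 : Nat)) : Int)) by push_cast; ring]
    rw [PySem.List.pyGetD_neg_natCast (xs := xs) (k := j + 1) (d := d) (by omega) (by simp; omega)]
    simp only [Int.toNat_natCast]
    rw [List.getElem_reverse]
    congr 1
    omega
  · rw [pyGetD_oor_high xs.reverse (j : Int) d (by simp; omega),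
        pyGetD_oor_low xs (-((j : Int) + 1)) d (by omega)]

-- ---- sorted commutes with a decorating map ----

theorem insertBy_map (bf : (String × List String) → (String × List String) → Bool)
    (g : String → String × List String) (x : String) (ys : List String) :
    PySem.List.insertBy bf (g x) (ys.map g)
      = (PySem.List.insertBy (fun a b => bf (g a) (g b)) x ys).map g := by
  induction ys with
  | nil => rfl
  | cons y ys ih =>
    simp only [List.map_cons]
    rw [PySem.List.insertBy, PySem.List.insertBy]
    by_cases hb : bf (g x) (g y) = true
    · simp [hb]
    · simp [hb, ih]

theorem sorted_map (l : List String) (g : String → String × List String)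
    (key : String × List String → String) :
    PySem.List.sorted (l.map g) key false
      = (PySem.List.sorted l (fun x => key (g x)) false).map g := by
  rw [PySem.List.sorted_eq_foldl_insertBy, PySem.List.sorted_eq_foldl_insertBy]
  have H : ∀ acc : List String,
      (l.map g).foldl (fun a x => PySem.List.insertBy (fun p q => decide (key p < key q)) x a) (acc.map g)
        = (l.foldl (fun a x => PySem.List.insertBy (fun p q => decide (key (g p) < key (g q))) x a) acc).map g := by
    induction l with
    | nil => intro acc; simp
    | cons r l ih =>
      intro acc
      simp only [List.map_cons, List.foldl_cons]
      rw [insertBy_map (fun p q => decide (key p < key q)) g r acc]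
      exact ih _
  simpa using H []

-- ---- A's depth scan computed from the folded common prefix ----

theorem scan_eq_lcp (grp : List String) (s0 : List String) (rest : List (List String)) (d : Int)
    (C : List String)
    (hC : ∀ p ∈ s0 :: rest, C <+: p.reverse)
    (hd_min : ∀ p ∈ s0 :: rest, d ≤ (p.length : Int))
    (hd_mem : ∃ p ∈ s0 :: rest, (p.length : Int) = d)
    (hmis : ((C.length : Int) < d) →
      ¬ ((s0 :: rest).map (fun p => PySem.List.pyGetD p (-((C.length : Int) + 1)) "")).all
          (fun y => y == PySem.List.pyGetD s0 (-((C.length : Int) + 1)) "") = true) :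
    ∀ n (j : Nat), C.length + 1 - j ≤ n → j ≤ C.length →
    aScan grp (s0 :: rest) (PySem.List.pyRange ((j : Int) + 1) (d + 1))
      = if (C.length : Int) < d then
          PySem.List.sorted grp (fun x => PySem.List.pyGetD (pySplitSlash x) (-((C.length : Int) + 1)) "") false
        else grp := by
  have hCd : (C.length : Int) ≤ d := by
    obtain ⟨p, hp, hlen⟩ := hd_mem
    have := (hC p hp).length_le
    simp at this
    omega
  intro n
  induction n with
  | zero => intro j h1 h2; omega
  | succ n ih =>
    intro j h1 h2
    by_cases hj : j < C.length
    · -- all columns agree at depth j+1: step to j+2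
      rw [PySem.List.pyRange_one_cons (by omega)]
      show (if 1 < (PySem.Set.ofList ((s0 :: rest).map (fun p => PySem.List.pyGetD p (-((j:Int)+1)) ""))).length then
          PySem.List.sorted grp (fun x => PySem.List.pyGetD (pySplitSlash x) (-((j:Int)+1)) "") false
        else aScan grp (s0 :: rest) (PySem.List.pyRange ((j:Int)+1+1) (d+1))) = _
      have hcomp : ∀ p ∈ s0 :: rest, PySem.List.pyGetD p (-((j:Int)+1)) "" = C[j] := by
        intro p hp
        rw [← key_ext p j ""]
        have hjp : j < p.length := by
          have := hd_min p hp; omega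
        rw [PySem.List.pyGetD_eq_getElem (xs := p.reverse) (i := (j:Int)) (d := "") (by omega)
            (by simp; exact_mod_cast hjp)]
        simp only [Int.toNat_natCast]
        exact ((hC p hp).getElem hj).symm
      rw [List.map_cons]
      have hall : ((PySem.List.pyGetD s0 (-((j:Int)+1)) ""
            :: rest.map (fun p => PySem.List.pyGetD p (-((j:Int)+1)) "")).all
          (fun y => y == PySem.List.pyGetD s0 (-((j:Int)+1)) "")) = true := by
        rw [List.all_eq_true]
        intro y hy
        rcases List.mem_cons.mp hy with h | h
        · subst h; simp
        · obtain ⟨p, hp, rfl⟩ := List.mem_map.mp h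
          rw [hcomp p (List.mem_cons_of_mem _ hp), hcomp s0 List.mem_cons_self]
          simp
      have hcard := (not_iff_not.mpr (set_card_gt_one (PySem.List.pyGetD s0 (-((j:Int)+1)) "")
          (rest.map (fun p => PySem.List.pyGetD p (-((j:Int)+1)) "")))).mpr (by rw [not_not]; exact hall)
      rw [if_neg hcard]
      rw [show ((j:Int)+1)+1 = (((j+1 : Nat)):Int)+1 by push_cast; ring]
      exact ih (j+1) (by omega) (by omega)
    · have hjC : j = C.length := by omega
      subst hjC
      by_cases hlt : (C.length:Int) < d
      · rw [if_pos hlt, PySem.List.pyRange_one_cons (by omega)]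
        show (if 1 < (PySem.Set.ofList ((s0 :: rest).map (fun p => PySem.List.pyGetD p (-((C.length:Int)+1)) ""))).length then
            PySem.List.sorted grp (fun x => PySem.List.pyGetD (pySplitSlash x) (-((C.length:Int)+1)) "") false
          else aScan grp (s0 :: rest) (PySem.List.pyRange ((C.length:Int)+1+1) (d+1))) = _
        have hmis' := hmis hlt
        rw [List.map_cons] at hmis' ⊢
        rw [if_pos ((set_card_gt_one _ _).mpr hmis')]
      · rw [if_neg hlt]
        have hdC : d = (C.length : Int) := by omega
        rw [PySem.List.pyRange_one_eq_nil (by omega)]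
        rfl

-- ---- per-value step: A's branch equals B's branch on the decorated group ----

theorem step_bridge (acc : List String) (l : List String) :
    (if l.isEmpty then acc
     else
       let split_results := l.map pySplitSlash
       let max_depth := (PySem.List.min? (split_results.map PySem.List.len) (fun x => x)).getD 0
       if l.length == 1 then acc ++ l
       else acc ++ aScan l split_results (PySem.List.pyRange 1 (max_depth + 1)))
    =
    (let grp := l.map (fun r => (r, (pySplitSlash r).reverse))
     if grp.isEmpty then acc
     else if grp.length == 1 then acc ++ [(PySem.List.pyGetD grp 0 ("", ([] : List String))).1]
     else
       let pre := (PySem.List.slice grp (some 1) none).foldl (fun s t => lcpL s t.2)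
         (PySem.List.pyGetD grp 0 ("", ([] : List String))).2
       let k := PySem.List.len pre
       if k < (PySem.List.min? (grp.map (fun t => PySem.List.len t.2)) (fun x => x)).getD 0 then
         acc ++ (PySem.List.sorted grp (fun t => PySem.List.pyGetD t.2 k "") false).map (fun t => t.1)
       else acc ++ grp.map (fun t => t.1)) := by
  match l with
  | [] => simp
  | [x] => simp [PySem.List.pyGetD_zero_cons]
  | x :: y :: t =>
    simp only []
    have h1 : (x :: y :: t).isEmpty = false := rfl
    have h2 : ((x :: y :: t).length == 1) = false := by simp
    have h3 : ((x :: y :: t).map (fun r => (r, (pySplitSlash r).reverse))).isEmpty = false := rfl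
    have h4 : (((x :: y :: t).map (fun r => (r, (pySplitSlash r).reverse))).length == 1) = false := by
      simp
    simp only [h1, h2, h3, h4, Bool.false_eq_true, if_false]
    have hmc1 : List.map (fun r => (r, (pySplitSlash r).reverse)) (x :: y :: t)
        = (x, (pySplitSlash x).reverse) :: List.map (fun r => (r, (pySplitSlash r).reverse)) (y :: t) := rfl
    rw [hmc1]
    rw [PySem.List.slice_from_one, List.tail_cons, PySem.List.pyGetD_zero_cons]
    have hmc2 : List.map pySplitSlash (x :: y :: t)
        = pySplitSlash x :: List.map pySplitSlash (y :: t) := rfl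
    rw [hmc2]
    simp only []
    rw [List.foldl_map]
    simp only []
    have hfold : (y :: t).foldl (fun s r => lcpL s (pySplitSlash r).reverse) (pySplitSlash x).reverse
        = ((y :: t).map pySplitSlash).foldl (fun a p => lcpL a p.reverse) (pySplitSlash x).reverse := by
      rw [List.foldl_map]
    rw [hfold]
    set s0 := pySplitSlash x with hs0
    set rest := (y :: t).map pySplitSlash with hrest
    set C := rest.foldl (fun a p => lcpL a p.reverse) s0.reverse with hCdef
    have hdd : (((x, s0.reverse) :: ((y :: t).map (fun r => (r, (pySplitSlash r).reverse)))).map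
          (fun t => PySem.List.len t.2))
        = ((s0 :: rest).map PySem.List.len) := by
      simp [hrest, List.map_map, Function.comp_def, PySem.List.len_eq]
    rw [hdd]
    cases hm : PySem.List.min? ((s0 :: rest).map PySem.List.len) (fun x => x) with
    | none =>
      exact absurd ((PySem.List.min?_eq_none_iff _ _).mp hm) (by simp)
    | some m =>
      simp only [Option.getD_some]
      have hd_min : ∀ p ∈ s0 :: rest, m ≤ (p.length : Int) := by
        intro p hp
        have := PySem.List.min?_isMin hm (PySem.List.len p) (List.mem_map_of_mem hp)
        simpa [PySem.List.len_eq] using this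
      have hd_mem : ∃ p ∈ s0 :: rest, (p.length : Int) = m := by
        have := PySem.List.min?_mem hm
        obtain ⟨p, hp, hpm⟩ := List.mem_map.mp this
        exact ⟨p, hp, by simpa [PySem.List.len_eq] using hpm⟩
      have hC : ∀ p ∈ s0 :: rest, C <+: p.reverse := by
        intro p hp
        rcases List.mem_cons.mp hp with h | h
        · subst h; exact fold_lcp_prefix_acc rest s0.reverse
        · exact fold_lcp_prefix_mem rest s0.reverse p h
      have hmis : ((C.length : Int) < m) →
          ¬ ((s0 :: rest).map (fun p => PySem.List.pyGetD p (-((C.length : Int) + 1)) "")).all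
              (fun y => y == PySem.List.pyGetD s0 (-((C.length : Int) + 1)) "") = true := by
        intro hlt hall
        have hval : ∀ p ∈ s0 :: rest,
            PySem.List.pyGetD p (-((C.length : Int) + 1)) ""
              = PySem.List.pyGetD s0 (-((C.length : Int) + 1)) "" := by
          intro p hp
          have := (List.all_eq_true.mp hall) _ (List.mem_map_of_mem hp)
          simpa using this
        set w := PySem.List.pyGetD s0 (-((C.length : Int) + 1)) "" with hw
        have hpref : ∀ p ∈ s0 :: rest, C ++ [w] <+: p.reverse := by
          intro p hp
          have hjp : C.length < p.length := by
            have := hd_min p hp; omega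
          have hget : p.reverse[C.length]'(by simpa using hjp) = w := by
            rw [← hval p hp, ← key_ext p C.length ""]
            rw [PySem.List.pyGetD_eq_getElem (xs := p.reverse) (i := (C.length : Int)) (d := "")
                (by omega) (by simp; exact_mod_cast hjp)]
            simp only [Int.toNat_natCast]
          have htake : p.reverse.take (C.length + 1) = C ++ [w] := by
            rw [List.take_add_one, ← List.prefix_iff_eq_take.mp (hC p hp)]
            rw [List.getElem?_eq_getElem (by simpa using hjp), hget]
            rfl
          rw [← htake]
          exact List.take_prefix _ _
        have hmax := fold_lcp_max rest s0.reverse (C ++ [w])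
          (hpref s0 List.mem_cons_self)
          (fun p hp => hpref p (List.mem_cons_of_mem _ hp))
        have hlenc := hmax.length_le
        rw [← hCdef] at hlenc
        simp at hlenc
      have hscan := scan_eq_lcp (x :: y :: t) s0 rest m C hC hd_min hd_mem hmis (C.length + 1) 0
        (by omega) (by omega)
      rw [show (((0 : Nat) : Int) + 1) = (1 : Int) by norm_num] at hscan
      rw [hscan]
      have hk : PySem.List.len C = (C.length : Int) := by simp [PySem.List.len_eq]
      rw [hk]
      have hfold2 : ((x, s0.reverse) :: (y :: t).map (fun r => (r, (pySplitSlash r).reverse)))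
          = (x :: y :: t).map (fun r => (r, (pySplitSlash r).reverse)) := by
        simp [hs0]
      by_cases hlt : (C.length : Int) < m
      · rw [if_pos hlt, if_pos hlt, hfold2]
        rw [sorted_map (x :: y :: t) (fun r => (r, (pySplitSlash r).reverse))
            (fun t => PySem.List.pyGetD t.2 ((C.length : Int)) "")]
        rw [List.map_map]
        have hid : ((fun t : String × List String => t.1)
            ∘ (fun r => (r, (pySplitSlash r).reverse))) = id := rfl
        rw [hid, List.map_id]
        have hkey : (fun r => (fun t : String × List String =>
              PySem.List.pyGetD t.2 ((C.length : Int)) "") ((fun r => (r, (pySplitSlash r).reverse)) r))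
            = (fun r => PySem.List.pyGetD (pySplitSlash r) (-((C.length : Int) + 1)) "") := by
          funext r
          exact key_ext (pySplitSlash r) C.length ""
        rw [hkey]
      · rw [if_neg hlt, if_neg hlt, hfold2, List.map_map]
        have hid : ((fun t : String × List String => t.1)
            ∘ (fun r => (r, (pySplitSlash r).reverse))) = id := rfl
        rw [hid, List.map_id]

-- ===== VERDICT (by name: the statement is the Claim_ definition above) =====
theorem sort_results_by_unique_values_spec : Claim_equal_sort_results_by_unique_values := by
  intro results uvs _hdom
  show sort_results_by_unique_values results uvs = sort_results_by_unique_values_alt results uvs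
  simp only [sort_results_by_unique_values, sort_results_by_unique_values_alt]
  apply PySem.List.foldl_congr_mem
  intro acc v hv
  simp only [PySem.List.slice?_none_none_neg_one, Option.getD_some]
  rw [getD_groups results (PySem.List.dedup uvs) (fun u r => PySem.Str.isIn ("/" ++ u ++ "/") r)
      (fun r => (r, (pySplitSlash r).reverse))
      _ v (PySem.List.nodup_dedup uvs) ((PySem.List.mem_dedup uvs v).mpr hv),
    getD_init_groups _ _ (fun u => PySem.Dict.getD_empty u []) v, List.nil_append]
  exact step_bridge acc (results.filter (fun r => PySem.Str.isIn ("/" ++ v ++ "/") r))
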